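-- pv_equiv track=rewrite | github.com/AJoigneau/FindSquare | find_square.py | check_map_valid
-- ===== SOURCE A (Python) =====
-- def check_map_valid(map_str):
--     if len(map_str) < 1:
--         return False
--     if any(char not in ".ox\n" for char in map_str):
--         return False
--     if map_str[-1] != "\n":
--         return False
--     lines = map_str.split("\n")[:-1]
--     if not check_lines_length(lines):
--         return False
--     return True
--
-- def check_lines_length(lines):
--     it = iter(lines)
--     expected_len = len(next(it))
--     if not all(len(l) == expected_len for l in it):
--         return False
--     else:
--         return True
-- ===== SOURCE B (Python) =====
-- def check_map_valid(map_str):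
--     expected = None
--     cur = 0
--     for ch in map_str:
--         if ch == '\n':
--             if expected is None:
--                 expected = cur
--             elif cur != expected:
--                 return False
--             cur = 0
--         elif ch == '.' or ch == 'o' or ch == 'x':
--             cur += 1
--         else:
--             return False
--     return expected is not None and cur == 0
-- ===== Notes on version B (the rewrite author's own statement) =====
-- stated objective: alternative
-- what changed: Replaced the multi-pass validation (whole-string character scan, last-character check, split into lines, then a line-length pass) with a single character-by-character pass keeping running state: the current line length and the expected length set at the first completed line.
import Mathlib
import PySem

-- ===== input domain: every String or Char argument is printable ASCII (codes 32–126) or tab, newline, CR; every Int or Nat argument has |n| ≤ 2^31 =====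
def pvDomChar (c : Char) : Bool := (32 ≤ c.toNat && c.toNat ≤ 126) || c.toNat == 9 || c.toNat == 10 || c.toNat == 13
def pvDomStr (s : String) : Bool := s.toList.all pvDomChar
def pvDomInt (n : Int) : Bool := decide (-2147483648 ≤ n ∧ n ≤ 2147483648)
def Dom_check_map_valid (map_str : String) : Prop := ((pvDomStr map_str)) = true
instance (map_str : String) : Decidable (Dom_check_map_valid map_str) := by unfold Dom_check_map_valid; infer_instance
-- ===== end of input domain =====

-- B replaces A's split-and-multi-pass validation with one character-by-character pass
-- keeping a running line length and the expected length (objective: alternative decomposition).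

-- ===== PORT A =====
-- helper check_lines_length: next(it) on an empty list would raise StopIteration;
-- that branch is unreachable from check_map_valid (the trailing-'\n' check guarantees
-- at least one line), we return false there.
def check_lines_length (lines : List String) : Bool :=
  match lines with
  | [] => false
  | l0 :: rest =>
    if !(rest.all (fun l => PySem.Str.len l == PySem.Str.len l0)) then false else true

def check_map_valid (map_str : String) : Bool :=
  if PySem.Str.len map_str < 1 then false
  else if map_str.toList.any (fun c => !(PySem.Str.isIn (String.ofList [c]) ".ox\n")) then false
  else if !(PySem.Str.pyGet? map_str (-1) == some '\n') then false
  else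
    match PySem.Str.split? map_str "\n" with
    | none => false   -- unreachable: the separator "\n" is nonempty
    | some parts =>
      let lines := PySem.List.slice parts none (some (-1))
      if !(check_lines_length lines) then false else true

-- ===== PORT B =====
-- one pass over the characters: `expected` is the length of the first completed line
-- (none until the first newline), `cur` the length of the line being read.
def altGo (l : List Char) (expected : Option Nat) (cur : Nat) : Bool :=
  match l with
  | [] => expected.isSome && cur == 0
  | ch :: rest =>
    if ch == '\n' then
      match expected with
      | none => altGo rest (some cur) 0
      | some e => if cur ≠ e then false else altGo rest (some e) 0
    else if ch == '.' || ch == 'o' || ch == 'x' then altGo rest expected (cur + 1)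
    else false

def check_map_valid_alt (map_str : String) : Bool :=
  altGo map_str.toList none 0

-- ===== PRECONDITION & SPEC =====
def Spec_check_map_valid (map_str : String) (out : Bool) : Prop := out = check_map_valid_alt map_str
instance (map_str : String) (out : Bool) : Decidable (Spec_check_map_valid map_str out) := by unfold Spec_check_map_valid; infer_instance

-- ===== CLAIM (what is proved, stated in full; the proofs are below) =====
def Claim_equal_check_map_valid : Prop := ∀ (map_str : String), Dom_check_map_valid map_str → Spec_check_map_valid map_str (check_map_valid map_str)

-- ===== LEMMAS AND PROOFS =====

/-- valid map characters -/
def vch (c : Char) : Bool := c == '.' || c == 'o' || c == 'x' || c == '\n'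

/-- prepend `p` onto the head segment -/
def consHead (p : List Char) : List (List Char) → List (List Char)
  | [] => [p]
  | t :: ts => (p ++ t) :: ts

/-- the segments of `l` split on newline (always nonempty; last = chars after the last newline) -/
def segs : List Char → List (List Char)
  | [] => [[]]
  | a :: rest => if a = '\n' then [] :: segs rest else consHead [a] (segs rest)

theorem consHead_ne_nil (p : List Char) (L : List (List Char)) : consHead p L ≠ [] := by
  cases L <;> simp [consHead]

theorem segs_ne_nil (l : List Char) : segs l ≠ [] := by
  cases l with
  | nil => simp [segs]
  | cons a rest => by_cases h : a = '\n' <;> simp [segs, h, consHead_ne_nil]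

theorem consHead_append (p : List Char) (L : List (List Char)) (x : List Char) (h : L ≠ []) :
    consHead p (L ++ [x]) = consHead p L ++ [x] := by
  cases L with
  | nil => exact absurd rfl h
  | cons t ts => simp [consHead]

theorem consHead_consHead (p : List Char) (a : Char) (L : List (List Char)) (h : L ≠ []) :
    consHead p (consHead [a] L) = consHead (p ++ [a]) L := by
  cases L with
  | nil => exact absurd rfl h
  | cons t ts => simp [consHead]

theorem splitOn_go_eq : ∀ (fuel : Nat) (l cur : List Char) (acc : List (List Char)),
    l.length < fuel →
    PySem.Chars.splitOn.go ['\n'] fuel l cur acc = acc.reverse ++ consHead cur.reverse (segs l) := by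
  intro fuel
  induction fuel with
  | zero => intro l cur acc h; omega
  | succ fuel ih =>
    intro l cur acc h
    cases l with
    | nil => simp [PySem.Chars.splitOn.go, consHead, segs]
    | cons a rest =>
      by_cases ha : a = '\n'
      · subst ha
        rw [show PySem.Chars.splitOn.go ['\n'] (fuel+1) ('\n' :: rest) cur acc
              = PySem.Chars.splitOn.go ['\n'] fuel (List.drop 1 ('\n' :: rest)) [] (cur.reverse :: acc) from by
            simp [PySem.Chars.splitOn.go, List.isPrefixOf]]
        rw [List.drop_one, List.tail_cons, ih rest [] (cur.reverse :: acc) (by simpa using h)]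
        cases hseg : segs rest with
        | nil => exact absurd hseg (segs_ne_nil rest)
        | cons t ts => simp [segs, consHead, hseg]
      · rw [show PySem.Chars.splitOn.go ['\n'] (fuel+1) (a :: rest) cur acc
              = PySem.Chars.splitOn.go ['\n'] fuel rest (a :: cur) acc from by
            simp [PySem.Chars.splitOn.go, List.isPrefixOf]
            intro h'; exact absurd h'.symm ha]
        rw [ih rest (a :: cur) acc (by simpa using h)]
        simp [segs, ha, consHead_consHead _ _ _ (segs_ne_nil rest)]

theorem splitOn_eq (l : List Char) : PySem.Chars.splitOn l ['\n'] = segs l := by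
  have h := splitOn_go_eq (l.length + 1) l [] [] (by omega)
  cases hseg : segs l with
  | nil => exact absurd hseg (segs_ne_nil l)
  | cons t ts => simp only [PySem.Chars.splitOn, hseg, consHead, List.reverse_nil, List.nil_append] at h ⊢; simpa using h

/-- what altGo computes once expected is set, on the segments -/
def segF (e cur : Nat) : List (List Char) → Bool
  | [] => decide (cur = 0)
  | [t] => decide (cur + t.length = 0)
  | t :: u :: ts => decide (cur + t.length = e) && segF e 0 (u :: ts)

/-- what altGo computes while expected is none, on the segments -/
def segG (cur : Nat) : List (List Char) → Bool
  | [] => false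
  | [_] => false
  | t :: u :: ts => segF (cur + t.length) 0 (u :: ts)

theorem segF_consHead (e cur : Nat) (a : Char) (L : List (List Char)) (h : L ≠ []) :
    segF e cur (consHead [a] L) = segF e (cur + 1) L := by
  match L with
  | [] => exact absurd rfl h
  | [t] => simp [consHead, segF]
  | t :: u :: ts =>
    simp only [consHead, List.singleton_append, segF, List.length_cons]
    simp only [show cur + (t.length + 1) = cur + 1 + t.length from by omega]

theorem segG_consHead (cur : Nat) (a : Char) (L : List (List Char)) (h : L ≠ []) :
    segG (cur) (consHead [a] L) = segG (cur + 1) L := by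
  match L with
  | [] => exact absurd rfl h
  | [t] => simp [consHead, segG]
  | t :: u :: ts => simp [consHead, segG]; ring_nf

theorem altGo_some : ∀ (l : List Char) (e cur : Nat),
    altGo l (some e) cur = (l.all vch && segF e cur (segs l)) := by
  intro l
  induction l with
  | nil => intro e cur; simp [altGo, segs, segF]; cases cur <;> simp
  | cons ch rest ih =>
    intro e cur
    by_cases hn : ch = '\n'
    · subst hn
      cases hseg : segs rest with
      | nil => exact absurd hseg (segs_ne_nil rest)
      | cons t ts =>
        by_cases hce : cur = e
        · simp [altGo, hce, ih, segs, hseg, segF, vch]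
        · simp [altGo, hce, segs, hseg, segF, vch]
    · by_cases hv : ch = '.' ∨ ch = 'o' ∨ ch = 'x'
      · have hvch : vch ch = true := by
          rcases hv with h | h | h <;> simp [vch, h]
        have hB : (ch == '.' || ch == 'o' || ch == 'x') = true := by
          rcases hv with h | h | h <;> simp [h]
        rw [show altGo (ch :: rest) (some e) cur = altGo rest (some e) (cur + 1) from by
          simp [altGo, hn, hB]]
        rw [ih e (cur + 1)]
        simp [segs, hn, hvch, segF_consHead _ _ _ _ (segs_ne_nil rest)]
      · have h1 : ch ≠ '.' := fun h => hv (Or.inl h)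
        have h2 : ch ≠ 'o' := fun h => hv (Or.inr (Or.inl h))
        have h3 : ch ≠ 'x' := fun h => hv (Or.inr (Or.inr h))
        have hvch : vch ch = false := by simp [vch, h1, h2, h3, hn]
        have hB : (ch == '.' || ch == 'o' || ch == 'x') = false := by
          simp [h1, h2, h3]
        simp [altGo, hn, hB, hvch]

theorem altGo_none : ∀ (l : List Char) (cur : Nat),
    altGo l none cur = (l.all vch && segG cur (segs l)) := by
  intro l
  induction l with
  | nil => intro cur; simp [altGo, segs, segG]
  | cons ch rest ih =>
    intro cur
    by_cases hn : ch = '\n'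
    · subst hn
      cases hseg : segs rest with
      | nil => exact absurd hseg (segs_ne_nil rest)
      | cons t ts =>
        simp [altGo, altGo_some, segs, hseg, segG, vch]
    · by_cases hv : ch = '.' ∨ ch = 'o' ∨ ch = 'x'
      · have hvch : vch ch = true := by
          rcases hv with h | h | h <;> simp [vch, h]
        have hB : (ch == '.' || ch == 'o' || ch == 'x') = true := by
          rcases hv with h | h | h <;> simp [h]
        rw [show altGo (ch :: rest) none cur = altGo rest none (cur + 1) from by
          simp [altGo, hn, hB]]
        rw [ih (cur + 1)]
        simp [segs, hn, hvch, segG_consHead _ _ _ (segs_ne_nil rest)]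
      · have h1 : ch ≠ '.' := fun h => hv (Or.inl h)
        have h2 : ch ≠ 'o' := fun h => hv (Or.inr (Or.inl h))
        have h3 : ch ≠ 'x' := fun h => hv (Or.inr (Or.inr h))
        have hvch : vch ch = false := by simp [vch, h1, h2, h3, hn]
        have hB : (ch == '.' || ch == 'o' || ch == 'x') = false := by
          simp [h1, h2, h3]
        simp [altGo, hn, hB, hvch]

theorem segF_last_ne (e : Nat) : ∀ (l : List Char) (cur : Nat), l ≠ [] → l.getLast? ≠ some '\n' →
    segF e cur (segs l) = false := by
  intro l
  induction l with
  | nil => intro cur h _; exact absurd rfl h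
  | cons a rest ih =>
    intro cur _ hlast
    cases rest with
    | nil =>
      have ha : a ≠ '\n' := by simpa using hlast
      simp [segs, ha, consHead, segF]
    | cons b rest' =>
      have hlast' : (b :: rest').getLast? ≠ some '\n' := by
        simpa [List.getLast?_cons_cons] using hlast
      by_cases ha : a = '\n'
      · cases hseg : segs (b :: rest') with
        | nil => exact absurd hseg (segs_ne_nil _)
        | cons t ts =>
          have hF := ih 0 (by simp) hlast'
          rw [hseg] at hF
          subst ha
          rw [show segs ('\n' :: b :: rest') = [] :: t :: ts from by rw [← hseg]; simp [segs]]
          rw [show segF e cur ([] :: t :: ts) = (decide (cur + List.length ([] : List Char) = e) && segF e 0 (t :: ts)) from rfl]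
          rw [hF, Bool.and_false]
      · rw [show segs (a :: b :: rest') = consHead [a] (segs (b :: rest')) from by simp [segs, ha]]
        rw [segF_consHead _ _ _ _ (segs_ne_nil _)]
        exact ih (cur + 1) (by simp) hlast'

theorem segG_last_ne : ∀ (l : List Char) (cur : Nat), l ≠ [] → l.getLast? ≠ some '\n' →
    segG cur (segs l) = false := by
  intro l
  induction l with
  | nil => intro cur h _; exact absurd rfl h
  | cons a rest ih =>
    intro cur _ hlast
    cases rest with
    | nil =>
      have ha : a ≠ '\n' := by simpa using hlast
      simp [segs, ha, consHead, segG]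
    | cons b rest' =>
      have hlast' : (b :: rest').getLast? ≠ some '\n' := by
        simpa [List.getLast?_cons_cons] using hlast
      by_cases ha : a = '\n'
      · cases hseg : segs (b :: rest') with
        | nil => exact absurd hseg (segs_ne_nil _)
        | cons t ts =>
          have hF := segF_last_ne (cur + List.length ([] : List Char)) (b :: rest') 0 (by simp) hlast'
          rw [hseg] at hF
          subst ha
          rw [show segs ('\n' :: b :: rest') = [] :: t :: ts from by rw [← hseg]; simp [segs]]
          rw [show segG cur ([] :: t :: ts) = segF (cur + List.length ([] : List Char)) 0 (t :: ts) from rfl]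
          rw [hF]
      · rw [show segs (a :: b :: rest') = consHead [a] (segs (b :: rest')) from by simp [segs, ha]]
        rw [segG_consHead _ _ _ (segs_ne_nil _)]
        exact ih (cur + 1) (by simp) hlast'

theorem segs_snoc_nl : ∀ (l : List Char), segs (l ++ ['\n']) = segs l ++ [[]] := by
  intro l
  induction l with
  | nil => simp [segs]
  | cons a rest ih =>
    by_cases ha : a = '\n'
    · simp [segs, ha, ih]
    · simp only [List.cons_append, segs, ha, if_false, ih]
      exact consHead_append [a] (segs rest) [] (segs_ne_nil rest)

theorem beq_decide (m n : Nat) : decide (m = n) = (m == n) := by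
  rw [Bool.eq_iff_iff]; simp

theorem segF_snoc_empty (e : Nat) : ∀ (L : List (List Char)),
    segF e 0 (L ++ [[]]) = L.all (fun t => t.length == e) := by
  intro L
  induction L with
  | nil => simp [segF]
  | cons t ts ih =>
    cases ts with
    | nil => simp [segF, beq_decide]
    | cons u ts' =>
      simp only [List.cons_append] at ih ⊢
      rw [show segF e 0 (t :: u :: (ts' ++ [[]])) = (decide (0 + t.length = e) && segF e 0 (u :: (ts' ++ [[]]))) from rfl]
      rw [ih]
      simp [beq_decide]

theorem segG_snoc_empty : ∀ (t : List Char) (ts : List (List Char)),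
    segG 0 ((t :: ts) ++ [[]]) = ts.all (fun u => u.length == t.length) := by
  intro t ts
  cases ts with
  | nil => simp [segG, segF]
  | cons u ts' =>
    rw [show segG 0 ((t :: u :: ts') ++ [[]]) = segF (0 + t.length) 0 ((u :: ts') ++ [[]]) from rfl]
    rw [segF_snoc_empty]
    simp

theorem isIn_singleton (c : Char) (m : List Char) :
    PySem.Chars.isIn [c] m = decide (c ∈ m) := by
  by_cases h : c ∈ m
  · have hin : [c] <:+: m := by
      rcases List.append_of_mem h with ⟨s, t, rfl⟩
      exact ⟨s, t, by simp⟩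
    rw [(PySem.Chars.isIn_iff_infix _ _).mpr hin]
    simp [h]
  · have hni : ¬ [c] <:+: m := fun hin => h (hin.subset (by simp))
    rw [(PySem.Chars.isIn_eq_false_iff _ _).mpr hni]
    simp [h]

theorem vch_mem (c : Char) : vch c = decide (c ∈ ['.', 'o', 'x', '\n']) := by
  rw [Bool.eq_iff_iff]
  simp [vch]
  tauto

theorem any_bridge (l : List Char) :
    (l.any fun c => !(PySem.Str.isIn (String.ofList [c]) ".ox\n")) = !l.all vch := by
  have h : ∀ c : Char, (!(PySem.Str.isIn (String.ofList [c]) ".ox\n")) = !(vch c) := by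
    intro c
    have hb : PySem.Str.isIn (String.ofList [c]) ".ox\n" = PySem.Chars.isIn [c] ['.', 'o', 'x', '\n'] := by
      simp
    rw [hb, isIn_singleton, vch_mem]
  calc (l.any fun c => !(PySem.Str.isIn (String.ofList [c]) ".ox\n"))
      = l.any fun c => !(vch c) := by simp only [h]
    _ = !l.all vch := by rw [List.any_eq_not_all_not]; simp

theorem if_bnot (b : Bool) : (if (!b) = true then false else true) = b := by
  cases b <;> simp

theorem final_case (l : List Char) (hval : l.all vch = true) (hlast : l.getLast? = some '\n') :
    check_lines_length (((segs l).dropLast).map String.ofList) = altGo l none 0 := by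
  have hdecomp : l.dropLast ++ ['\n'] = l := List.dropLast_append_getLast? '\n' hlast
  rw [altGo_none, hval, Bool.true_and, ← hdecomp, segs_snoc_nl, List.dropLast_concat]
  cases hs : segs l.dropLast with
  | nil => exact absurd hs (segs_ne_nil _)
  | cons t ts =>
    rw [segG_snoc_empty]
    simp [check_lines_length, List.all_map, Function.comp_def]
    rw [Bool.eq_iff_iff]
    simp

-- ===== VERDICT (by name: the statement is the Claim_ definition above) =====
theorem check_map_valid_spec : Claim_equal_check_map_valid := by
  intro map_str _
  unfold Spec_check_map_valid check_map_valid check_map_valid_alt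
  by_cases hnil : map_str.toList = []
  · rw [if_pos (by simp [hnil])]
    rw [hnil]
    simp [altGo]
  · have hpos : 0 < map_str.toList.length := List.length_pos_of_ne_nil hnil
    rw [if_neg (by simp only [PySem.Str.len_eq]; omega)]
    by_cases hval : map_str.toList.all vch = true
    · rw [if_neg (by rw [any_bridge, hval]; simp)]
      by_cases hlast : map_str.toList.getLast? = some '\n'
      · rw [if_neg (by simp [PySem.List.pyGet?_neg_one, hlast])]
        have hsplit : PySem.Str.split? map_str "\n" = some ((segs map_str.toList).map String.ofList) := by
          simp [PySem.Str.split?, PySem.Chars.split?, splitOn_eq]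
        rw [hsplit]
        simp only [PySem.List.slice_to_neg_one, ← List.map_dropLast]
        rw [if_bnot, final_case map_str.toList hval hlast]
      · rw [if_pos (by simp [PySem.List.pyGet?_neg_one, hlast])]
        rw [altGo_none, segG_last_ne map_str.toList 0 hnil hlast]
        simp
    · rw [if_pos (by rw [any_bridge]; simpa using hval)]
      rw [altGo_none]
      simp [Bool.eq_false_iff.mpr hval]
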